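-- pv_equiv track=rewrite | github.com/JakubDotPy/aoc2018 | day02/part1.py | compute
-- ===== SOURCE A (Python) =====
-- from collections import Counter
--
-- def compute(s: str) -> int:
--     twos = 0
--     threes = 0
--
--     for word in s.splitlines():
--         counts = Counter(word)
--
--         threes += 3 in counts.values()
--         twos += 2 in counts.values()
--
--     return threes * twos
-- ===== SOURCE B (Python) =====
-- def compute(s: str) -> int:
--     twos = 0
--     threes = 0
--     for word in s.splitlines():
--         w = sorted(word)
--         has2 = False
--         has3 = False
--         if w:
--             cur = w[0]
--             cnt = 1
--             for c in w[1:]: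
--                 if c == cur:
--                     cnt += 1
--                 else:
--                     has2 = has2 or cnt == 2
--                     has3 = has3 or cnt == 3
--                     cur = c
--                     cnt = 1
--             has2 = has2 or cnt == 2
--             has3 = has3 or cnt == 3
--         twos += has2
--         threes += has3
--     return threes * twos
-- ===== Notes on version B (the rewrite author's own statement) =====
-- stated objective: alternative
-- what changed: Replaces the per-word Counter frequency table and membership test on its values with sorting each word's characters and a single scan over consecutive runs, flagging a run of length exactly 2 and exactly 3.
import Mathlib
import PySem

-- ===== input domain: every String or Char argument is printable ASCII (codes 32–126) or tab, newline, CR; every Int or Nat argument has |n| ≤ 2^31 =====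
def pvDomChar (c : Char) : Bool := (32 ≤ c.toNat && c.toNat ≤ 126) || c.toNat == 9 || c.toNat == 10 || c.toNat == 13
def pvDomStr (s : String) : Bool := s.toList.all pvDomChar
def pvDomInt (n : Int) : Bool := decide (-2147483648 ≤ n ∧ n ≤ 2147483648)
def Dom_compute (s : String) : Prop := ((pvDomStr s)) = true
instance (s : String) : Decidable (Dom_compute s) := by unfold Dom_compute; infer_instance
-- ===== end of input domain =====

-- B replaces the Counter frequency table with sort-each-word + one scan over consecutive runs (objective: alternative).

-- ===== PORT A =====
def compute (s : String) : Int :=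
  let r := (PySem.Str.splitlines s).foldl (fun (acc : Int × Int) word =>
    let counts := PySem.Dict.counter word.toList
    let threes := acc.2 + (if (3 : Int) ∈ counts.values then 1 else 0)
    let twos := acc.1 + (if (2 : Int) ∈ counts.values then 1 else 0)
    (twos, threes)) (0, 0)
  r.2 * r.1

-- ===== PORT B =====
-- inner loop of Source B: current run char, run length so far, and the two flags
def runScan : List Char → Char → Nat → Bool → Bool → Bool × Bool
  | [], _, cnt, h2, h3 => (h2 || cnt == 2, h3 || cnt == 3)
  | c :: rest, cur, cnt, h2, h3 =>
    if c == cur then runScan rest cur (cnt + 1) h2 h3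
    else runScan rest c 1 (h2 || cnt == 2) (h3 || cnt == 3)

def wordFlags (word : String) : Bool × Bool :=
  match PySem.List.sorted word.toList (fun c => c) false with
  | [] => (false, false)
  | c :: rest => runScan rest c 1 false false

def compute_alt (s : String) : Int :=
  let r := (PySem.Str.splitlines s).foldl (fun (acc : Int × Int) word =>
    let f := wordFlags word
    (acc.1 + (if f.1 then 1 else 0), acc.2 + (if f.2 then 1 else 0))) (0, 0)
  r.2 * r.1

-- ===== PRECONDITION & SPEC =====
def Spec_compute (s : String) (out : Int) : Prop := out = compute_alt s
instance (s : String) (out : Int) : Decidable (Spec_compute s out) := by unfold Spec_compute; infer_instance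

-- ===== CLAIM (what is proved, stated in full; the proofs are below) =====
def Claim_equal_compute : Prop := ∀ (s : String), Dom_compute s → Spec_compute s (compute s)

-- ===== LEMMAS AND PROOFS =====

theorem beq_decide (a b : Nat) : (a == b) = decide (a = b) := by
  by_cases h : a = b <;> simp [h]

theorem runScan_eq (rest : List Char) : ∀ (cur : Char) (cnt : Nat) (h2 h3 : Bool),
    rest.Pairwise (· ≤ ·) → (∀ x ∈ rest, cur ≤ x) →
    runScan rest cur cnt h2 h3 =
      (h2 || decide (cnt + rest.count cur = 2 ∨ ∃ c ∈ rest, cur < c ∧ rest.count c = 2),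
       h3 || decide (cnt + rest.count cur = 3 ∨ ∃ c ∈ rest, cur < c ∧ rest.count c = 3)) := by
  induction rest with
  | nil =>
    intro cur cnt h2 h3 _ _
    simp [runScan, List.count_nil, beq_decide]
  | cons c rest ih =>
    intro cur cnt h2 h3 hp hge
    have hpr : rest.Pairwise (· ≤ ·) := hp.of_cons
    have hcge : ∀ x ∈ rest, c ≤ x := fun x hx => (List.pairwise_cons.mp hp).1 x hx
    by_cases hc : c = cur
    · subst hc
      rw [runScan, if_pos (by simp)]
      rw [ih c (cnt+1) h2 h3 hpr hcge]
      have key : ∀ k : Nat,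
          ((cnt+1) + rest.count c = k ∨ ∃ d ∈ rest, c < d ∧ rest.count d = k) ↔
          (cnt + (c :: rest).count c = k ∨ ∃ d ∈ c :: rest, c < d ∧ (c :: rest).count d = k) := by
        intro k
        constructor
        · rintro (h | ⟨d, hd, hlt, hcount⟩)
          · left; rw [List.count_cons_self]; omega
          · right; exact ⟨d, List.mem_cons_of_mem _ hd, hlt,
              by rw [List.count_cons_of_ne hlt.ne]; exact hcount⟩
        · rintro (h | ⟨d, hd, hlt, hcount⟩)
          · left; rw [List.count_cons_self] at h; omega
          · rcases List.mem_cons.mp hd with rfl | hd'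
            · exact absurd hlt (lt_irrefl _)
            · right; exact ⟨d, hd', hlt,
                by rw [List.count_cons_of_ne hlt.ne] at hcount; exact hcount⟩
      rw [Bool.decide_congr (key 2), Bool.decide_congr (key 3)]
    · have hlt : cur < c := lt_of_le_of_ne (hge c (List.mem_cons_self)) (fun h => hc h.symm)
      rw [runScan, if_neg (by simp [hc])]
      rw [ih c 1 _ _ hpr hcge]
      have hnotmem : (c :: rest).count cur = 0 := by
        rw [List.count_eq_zero]
        intro hmem
        rcases List.mem_cons.mp hmem with rfl | hmem'
        · exact hc rfl
        · exact absurd (hcge cur hmem') (not_le.mpr hlt)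
      have key : ∀ k : Nat,
          (cnt = k ∨ (1 + rest.count c = k ∨ ∃ d ∈ rest, c < d ∧ rest.count d = k)) ↔
          (cnt + (c :: rest).count cur = k ∨ ∃ d ∈ c :: rest, cur < d ∧ (c :: rest).count d = k) := by
        intro k
        rw [hnotmem]
        constructor
        · rintro (h | h | ⟨d, hd, hdlt, hcount⟩)
          · left; omega
          · right; exact ⟨c, List.mem_cons_self, hlt, by rw [List.count_cons_self]; omega⟩
          · right; exact ⟨d, List.mem_cons_of_mem _ hd, lt_trans hlt hdlt,
              by rw [List.count_cons_of_ne hdlt.ne]; exact hcount⟩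
        · rintro (h | ⟨d, hd, hdlt, hcount⟩)
          · left; omega
          · rcases List.mem_cons.mp hd with rfl | hd'
            · right; left; rw [List.count_cons_self] at hcount; omega
            · have hcd : c ≤ d := hcge d hd'
              rcases eq_or_lt_of_le hcd with rfl | hcd'
              · right; left; rw [List.count_cons_self] at hcount; omega
              · right; right; exact ⟨d, hd', hcd',
                  by rw [List.count_cons_of_ne hcd'.ne] at hcount; exact hcount⟩
      have e2 : ∀ (h : Bool) (k : Nat),
          ((h || cnt == k) || decide (1 + rest.count c = k ∨ ∃ d ∈ rest, c < d ∧ rest.count d = k)) =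
          (h || decide (cnt + (c :: rest).count cur = k ∨ ∃ d ∈ c :: rest, cur < d ∧ (c :: rest).count d = k)) := by
        intro h k
        rw [Bool.or_assoc, ← Bool.decide_congr (key k)]
        simp [Bool.decide_or, beq_decide]
      exact Prod.ext (e2 h2 2) (e2 h3 3)

theorem wordFlags_eq (word : String) :
    wordFlags word = (decide (∃ c ∈ word.toList, word.toList.count c = 2),
                      decide (∃ c ∈ word.toList, word.toList.count c = 3)) := by
  unfold wordFlags
  cases hs : PySem.List.sorted word.toList (fun c => c) false with
  | nil =>
    have hnil : word.toList = [] := (PySem.List.sorted_eq_nil_iff _ _ _).mp hs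
    simp [hnil]
  | cons c rest =>
    have hperm : (c :: rest).Perm word.toList := hs ▸ PySem.List.sorted_perm word.toList _ false
    have hp : (c :: rest).Pairwise (fun a b => a ≤ b) := by
      have := PySem.List.sorted_pairwise word.toList (fun c => c)
      rw [hs] at this
      exact this
    have hpr : rest.Pairwise (fun a b => a ≤ b) := hp.of_cons
    have hcge : ∀ x ∈ rest, c ≤ x := fun x hx => (List.pairwise_cons.mp hp).1 x hx
    show runScan rest c 1 false false = _
    rw [runScan_eq rest c 1 false false hpr hcge]
    have key : ∀ k : Nat,
        (1 + rest.count c = k ∨ ∃ d ∈ rest, c < d ∧ rest.count d = k) ↔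
        (∃ d ∈ word.toList, word.toList.count d = k) := by
      intro k
      have hm : ∀ d, d ∈ word.toList ↔ d ∈ c :: rest := fun d => (hperm.mem_iff).symm
      have hc : ∀ d, word.toList.count d = (c :: rest).count d := fun d => (hperm.count_eq d).symm
      constructor
      · rintro (h | ⟨d, hd, hlt, hcount⟩)
        · exact ⟨c, (hm c).mpr List.mem_cons_self, by
            rw [hc, List.count_cons_self]; omega⟩
        · exact ⟨d, (hm d).mpr (List.mem_cons_of_mem _ hd), by
            rw [hc, List.count_cons_of_ne hlt.ne]; exact hcount⟩
      · rintro ⟨d, hd, hcount⟩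
        rw [hc] at hcount
        rcases List.mem_cons.mp ((hm d).mp hd) with rfl | hd'
        · left; rw [List.count_cons_self] at hcount; omega
        · rcases eq_or_lt_of_le (hcge d hd') with rfl | hlt
          · left; rw [List.count_cons_self] at hcount; omega
          · right; exact ⟨d, hd', hlt, by
              rw [List.count_cons_of_ne hlt.ne] at hcount; exact hcount⟩
    rw [Bool.false_or, Bool.false_or, Bool.decide_congr (key 2), Bool.decide_congr (key 3)]

theorem values_mem_counter (w : List Char) (k : Nat) :
    ((k : Int) ∈ (PySem.Dict.counter w).values) ↔ ∃ c ∈ w, w.count c = k := by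
  rw [PySem.Dict.values_eq_map_keys _ (PySem.Dict.nodup_keys_counter w) 0]
  simp [PySem.Dict.keys_counter, PySem.Dict.getD_counter, PySem.Set.mem_ofList]

-- ===== VERDICT (by name: the statement is the Claim_ definition above) =====
theorem compute_spec : Claim_equal_compute := by
  intro s _
  unfold Spec_compute compute compute_alt
  have hstep : (fun (acc : Int × Int) (word : String) =>
      let counts := PySem.Dict.counter word.toList
      let threes := acc.2 + (if (3 : Int) ∈ counts.values then 1 else 0)
      let twos := acc.1 + (if (2 : Int) ∈ counts.values then 1 else 0)
      ((twos, threes) : Int × Int)) =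
      (fun (acc : Int × Int) (word : String) =>
      let f := wordFlags word
      (acc.1 + (if f.1 then 1 else 0), acc.2 + (if f.2 then 1 else 0))) := by
    funext acc word
    simp only [wordFlags_eq]
    have h2 := values_mem_counter word.toList 2
    have h3 := values_mem_counter word.toList 3
    push_cast at h2 h3
    simp [h2, h3]
  rw [hstep]
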